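-- pv_equiv track=rewrite | github.com/Edsel-Tan/dashboard | Solutions/845.py | add_digit
-- ===== SOURCE A (Python) =====
-- def add_digit(ds, digits):
--     nds = ds.copy()
--     for i in digits:
--         for j in ds.keys():
--             if j + i not in nds.keys():
--                 nds[j+i] = ds[j]
--             else:
--                 nds[j+i] += ds[j]
--     return nds
-- ===== SOURCE B (Python) =====
-- def add_digit(ds, digits):
--     # Gather formulation: tally the digits once, derive the output key order,
--     # then compute each output value independently as a closed-form sum of
--     # lookups into ds -- no accumulation dict is ever updated.
--     dc = {}
--     for i in digits:
--         dc[i] = dc.get(i, 0) + 1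
--     order = list(ds)
--     seen = set(order)
--     for i in dc:
--         for j in ds:
--             k = j + i
--             if k not in seen:
--                 seen.add(k)
--                 order.append(k)
--     return {k: ds.get(k, 0) + sum(c * ds.get(k - i, 0) for i, c in dc.items())
--             for k in order}
-- ===== Notes on version B (the rewrite author's own statement) =====
-- stated objective: alternative
-- what changed: A scatters: it mutates an accumulator dict, adding ds[j] into nds[j+i] per digit occurrence with an in/not-in branch; B gathers: it tallies the digits once, derives the output key order, then builds the result in one comprehension whose value at each key k is the closed-form sum ds.get(k,0) + sum(c * ds.get(k-i,0) over distinct digits i with count c) -- no accumulator is ever updated.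
import Mathlib
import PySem

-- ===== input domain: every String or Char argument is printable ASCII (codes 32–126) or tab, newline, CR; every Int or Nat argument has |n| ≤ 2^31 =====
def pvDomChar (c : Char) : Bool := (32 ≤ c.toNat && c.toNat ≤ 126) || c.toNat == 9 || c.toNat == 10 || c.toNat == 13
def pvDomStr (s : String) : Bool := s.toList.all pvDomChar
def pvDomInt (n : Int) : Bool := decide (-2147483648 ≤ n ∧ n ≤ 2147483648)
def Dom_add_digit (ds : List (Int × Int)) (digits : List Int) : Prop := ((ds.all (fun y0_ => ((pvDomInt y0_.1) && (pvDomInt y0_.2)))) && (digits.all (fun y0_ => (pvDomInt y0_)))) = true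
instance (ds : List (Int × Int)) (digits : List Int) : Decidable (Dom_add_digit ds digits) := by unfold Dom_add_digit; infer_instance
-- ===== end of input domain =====

-- B replaces A's scatter-style accumulation dict by a gather formulation: tally the digits,
-- derive the output key order, then compute every value independently by a closed-form sum
-- of lookups into ds (objective: alternative algorithm, same cost class).

-- ===== PORT A =====
def add_digit (ds : List (Int × Int)) (digits : List Int) : List (Int × Int) :=
  let dsD : PySem.Dict Int Int := PySem.Dict.mk ds
  (digits.foldl (fun nds i =>
    dsD.keys.foldl (fun nds j =>
      if nds.contains (j + i) = false then
        nds.insert (j + i) (dsD.getD j 0)      -- nds[j+i] = ds[j] (j ∈ ds.keys, so getD is exact)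
      else
        nds.modify (j + i) 0 (· + dsD.getD j 0)  -- nds[j+i] += ds[j] (key present here)
      ) nds) dsD).items

-- ===== PORT B =====
def add_digit_alt (ds : List (Int × Int)) (digits : List Int) : List (Int × Int) :=
  let dsD : PySem.Dict Int Int := PySem.Dict.mk ds
  -- dc[i] = dc.get(i, 0) + 1
  let dc : PySem.Dict Int Int :=
    digits.foldl (fun d i => d.insert i (d.getD i 0 + 1)) PySem.Dict.empty
  -- order/seen: a Python list + set kept in sync is PySem.Set (first-insertion order)
  let order : PySem.Set Int :=
    dc.keys.foldl (fun ord i =>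
      dsD.keys.foldl (fun ord j => PySem.Set.add ord (j + i)) ord)
      (PySem.Set.ofList dsD.keys)
  -- {k: ds.get(k, 0) + sum(c * ds.get(k - i, 0) for i, c in dc.items()) for k in order}
  order.map (fun k =>
    (k, dsD.getD k 0 + dc.items.foldl (fun s p => s + p.2 * dsD.getD (k - p.1) 0) 0))

-- ===== PRECONDITION & SPEC =====
-- Pre_ excludes association lists with duplicate keys, which cannot arise from a Python
-- dict argument (Python's `ds` is a dict, whose keys are unique by construction).
def Pre_add_digit (ds : List (Int × Int)) (digits : List Int) : Prop :=
  (ds.map Prod.fst).Nodup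

instance (ds : List (Int × Int)) (digits : List Int) : Decidable (Pre_add_digit ds digits) := by
  unfold Pre_add_digit; infer_instance

def pvWitness_add_digit : (List (Int × Int)) × List Int := ([(1, 2), (3, 4)], [1, 1, 2])

def Spec_add_digit (ds : List (Int × Int)) (digits : List Int) (out : List (Int × Int)) : Prop := out = add_digit_alt ds digits
instance (ds : List (Int × Int)) (digits : List Int) (out : List (Int × Int)) : Decidable (Spec_add_digit ds digits out) := by unfold Spec_add_digit; infer_instance

-- ===== CLAIM (what is proved, stated in full; the proofs are below) =====
def Claim_equal_add_digit : Prop := ∀ (ds : List (Int × Int)) (digits : List Int), Dom_add_digit ds digits → Pre_add_digit ds digits → Spec_add_digit ds digits (add_digit ds digits)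

-- ===== LEMMAS AND PROOFS =====

-- One state-dependent accumulate step: d[k] = d.get(k, 0) + w for a (key, weight) pair.
def pvS (d : PySem.Dict Int Int) (p : Int × Int) : PySem.Dict Int Int :=
  d.insert p.1 (d.getD p.1 0 + p.2)

def pvFoldS (ps : List (Int × Int)) (d : PySem.Dict Int Int) : PySem.Dict Int Int :=
  ps.foldl pvS d

-- The step list of one pass over `ys` with digit `i`, each value scaled by `c`.
def pvSteps (ys : List (Int × Int)) (i c : Int) : List (Int × Int) :=
  ys.map (fun jv => (jv.1 + i, c * jv.2))

def pvPass (ys : List (Int × Int)) (i c : Int) (d : PySem.Dict Int Int) : PySem.Dict Int Int :=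
  pvFoldS (pvSteps ys i c) d

theorem pv_contains_pvS (d : PySem.Dict Int Int) (p : Int × Int) (k : Int)
    (h : d.contains k = true) : (pvS d p).contains k = true := by
  simp [pvS, PySem.Dict.contains_insert, h]

theorem pv_contains_pvFoldS (ps : List (Int × Int)) (d : PySem.Dict Int Int) (k : Int)
    (h : d.contains k = true) : (pvFoldS ps d).contains k = true := by
  induction ps generalizing d with
  | nil => exact h
  | cons p ps ih => exact ih (pvS d p) (pv_contains_pvS d p k h)

theorem pv_contains_pvFoldS_of_mem (ps : List (Int × Int)) (d : PySem.Dict Int Int)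
    {k w : Int} (h : (k, w) ∈ ps) : (pvFoldS ps d).contains k = true := by
  induction ps generalizing d with
  | nil => cases h
  | cons p ps ih =>
    rcases List.mem_cons.mp h with h | h
    · cases h
      exact pv_contains_pvFoldS ps (pvS d (k, w)) k (by simp [pvS])
    · exact ih (pvS d p) h

theorem pv_pvS_pvS_self (d : PySem.Dict Int Int) (k w w' : Int) :
    pvS (pvS d (k, w')) (k, w) = PySem.Dict.insert d k (d.getD k 0 + w' + w) := by
  simp [pvS, PySem.Dict.getD_insert_self, PySem.Dict.insert_insert_self]

theorem pv_insert_insert_comm (d : PySem.Dict Int Int) (k k' b a : Int)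
    (hk : d.contains k = true) (hne : k ≠ k') :
    (d.insert k' a).insert k b = (d.insert k b).insert k' a := by
  apply PySem.Dict.ext
  by_cases hk' : d.contains k' = true
  · rw [PySem.Dict.items_insert_of_contains _ b
        (by simp [PySem.Dict.contains_insert, hk]),
      PySem.Dict.items_insert_of_contains _ a hk',
      PySem.Dict.items_insert_of_contains _ a
        (by simp [PySem.Dict.contains_insert, hk']),
      PySem.Dict.items_insert_of_contains _ b hk]
    rw [List.map_map, List.map_map]
    apply List.map_congr_left
    intro p _
    by_cases h1 : p.1 = k' <;> by_cases h2 : p.1 = k <;>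
      simp_all [Function.comp, Ne.symm hne]
  · rw [PySem.Dict.items_insert_of_contains _ b
        (by simp [PySem.Dict.contains_insert, hk]),
      PySem.Dict.items_insert_of_not_contains _ a (by simpa using hk'),
      PySem.Dict.items_insert_of_not_contains _ a
        (by simp [PySem.Dict.contains_insert, Ne.symm hne]; simpa using hk'),
      PySem.Dict.items_insert_of_contains _ b hk]
    simp [Ne.symm hne]

theorem pv_pvS_comm (d : PySem.Dict Int Int) (p q : Int × Int)
    (hq : d.contains q.1 = true) : pvS (pvS d p) q = pvS (pvS d q) p := by
  by_cases h : q.1 = p.1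
  · obtain ⟨k, w⟩ := p; obtain ⟨k', w'⟩ := q
    simp only at h; subst h
    rw [pv_pvS_pvS_self, pv_pvS_pvS_self]
    ring_nf
  · obtain ⟨k, w⟩ := p; obtain ⟨k', w'⟩ := q
    simp only at h hq
    simp only [pvS]
    rw [PySem.Dict.getD_insert_of_ne _ _ _ h, PySem.Dict.getD_insert_of_ne _ _ _ (Ne.symm h)]
    exact pv_insert_insert_comm d k' k _ _ hq h

theorem pv_pvS_pvFoldS_comm (ps : List (Int × Int)) (d : PySem.Dict Int Int) (q : Int × Int)
    (hq : d.contains q.1 = true) : pvFoldS ps (pvS d q) = pvS (pvFoldS ps d) q := by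
  induction ps generalizing d with
  | nil => rfl
  | cons p ps ih =>
    show pvFoldS ps (pvS (pvS d q) p) = pvS (pvFoldS ps (pvS d p)) q
    rw [← pv_pvS_comm d p q hq]
    exact ih (pvS d p) (pv_contains_pvS d p q.1 hq)

theorem pv_pvFoldS_comm (ps qs : List (Int × Int)) (d : PySem.Dict Int Int)
    (h : ∀ q ∈ qs, d.contains q.1 = true) :
    pvFoldS ps (pvFoldS qs d) = pvFoldS qs (pvFoldS ps d) := by
  induction qs generalizing d with
  | nil => rfl
  | cons q qs ih =>
    show pvFoldS ps (pvFoldS qs (pvS d q)) = pvFoldS qs (pvS (pvFoldS ps d) q)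
    rw [ih (pvS d q) (fun q' hq' => pv_contains_pvS d q q'.1 (h q' (List.mem_cons_of_mem _ hq'))),
      pv_pvS_pvFoldS_comm ps d q (h q List.mem_cons_self)]

theorem pv_pass_merge (ys : List (Int × Int)) (i b c : Int) (d : PySem.Dict Int Int) :
    pvPass ys i b (pvPass ys i c d) = pvPass ys i (b + c) d := by
  induction ys generalizing d with
  | nil => rfl
  | cons jv rest ih =>
    show pvFoldS (pvSteps rest i b)
        (pvS (pvFoldS (pvSteps rest i c) (pvS d (jv.1 + i, c * jv.2))) (jv.1 + i, b * jv.2)) =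
      pvFoldS (pvSteps rest i (b + c)) (pvS d (jv.1 + i, (b + c) * jv.2))
    rw [← pv_pvS_pvFoldS_comm (pvSteps rest i c) (pvS d (jv.1 + i, c * jv.2))
        (jv.1 + i, b * jv.2) (by simp [pvS])]
    rw [pv_pvS_pvS_self]
    have : d.getD (jv.1 + i) 0 + c * jv.2 + b * jv.2 = d.getD (jv.1 + i) 0 + (b + c) * jv.2 := by
      ring
    rw [this]
    exact ih (pvS d (jv.1 + i, (b + c) * jv.2))

theorem pv_iterate_merge (ys : List (Int × Int)) (i c : Int) (n : Nat) (d : PySem.Dict Int Int) :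
    (fun d => pvPass ys i 1 d)^[n] (pvPass ys i c d) = pvPass ys i ((n : Int) + c) d := by
  induction n generalizing d with
  | zero => simp
  | succ n ih =>
    rw [Function.iterate_succ_apply', ih, pv_pass_merge]
    congr 1
    push_cast
    ring

theorem pv_contains_iterate (ys : List (Int × Int)) (i : Int) (n : Nat)
    (d : PySem.Dict Int Int) (k : Int) (h : d.contains k = true) :
    ((fun d => pvPass ys i 1 d)^[n] d).contains k = true := by
  induction n generalizing d with
  | zero => exact h
  | succ n ih =>
    rw [Function.iterate_succ_apply]
    exact ih _ (pv_contains_pvFoldS _ d k h)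

theorem pv_iterate_pass_comm (ys : List (Int × Int)) (i a : Int) (n : Nat)
    (d : PySem.Dict Int Int) (hP : ∀ jv ∈ ys, d.contains (jv.1 + i) = true) :
    (fun d => pvPass ys i 1 d)^[n] (pvPass ys a 1 d) =
      pvPass ys a 1 ((fun d => pvPass ys i 1 d)^[n] d) := by
  induction n generalizing d with
  | zero => rfl
  | succ n ih =>
    rw [Function.iterate_succ_apply', Function.iterate_succ_apply', ih d hP]
    refine (pv_pvFoldS_comm (pvSteps ys a 1) (pvSteps ys i 1) _ ?_).symm
    intro q hq
    rcases List.mem_map.mp hq with ⟨jv, hjv, rfl⟩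
    exact pv_contains_iterate ys i n d _ (hP jv hjv)

-- Rearrangement: later occurrences of digit i (whose target keys are all present)
-- can be peeled off the digit list and iterated at the front.
theorem pv_rearrange (ys : List (Int × Int)) (i : Int) (t : List Int)
    (d : PySem.Dict Int Int) (hP : ∀ jv ∈ ys, d.contains (jv.1 + i) = true) :
    t.foldl (fun d a => pvPass ys a 1 d) d =
      (t.filter (fun a => a != i)).foldl (fun d a => pvPass ys a 1 d)
        ((fun d => pvPass ys i 1 d)^[t.count i] d) := by
  induction t generalizing d with
  | nil => rfl
  | cons a t ih =>
    by_cases hai : a = i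
    · subst hai
      show t.foldl _ (pvPass ys a 1 d) = _
      rw [ih (pvPass ys a 1 d)
          (fun jv hjv => pv_contains_pvFoldS _ d _ (hP jv hjv)),
        List.filter_cons_of_neg (by simp), List.count_cons_self,
        Function.iterate_succ_apply]
    · have hb : (a != i) = true := bne_iff_ne.mpr hai
      show t.foldl _ (pvPass ys a 1 d) = _
      rw [ih (pvPass ys a 1 d)
          (fun jv hjv => pv_contains_pvFoldS _ d _ (hP jv hjv)),
        pv_iterate_pass_comm ys i a _ d hP]
      have h1 : List.filter (fun x => x != i) (a :: t) = a :: List.filter (fun x => x != i) t := by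
        simp [hai]
      have h2 : List.count i (a :: t) = List.count i t := by
        simp [hai]
      rw [h1, h2]
      rfl

theorem pv_discard_ofList (t : List Int) (i : Int) :
    (PySem.Set.ofList t).discard i = PySem.Set.ofList (t.filter (fun a => a != i)) := by
  induction t with
  | nil => rfl
  | cons a t ih =>
    by_cases hai : a = i
    · subst hai
      have h1 : List.filter (fun x => x != a) (a :: t) = List.filter (fun x => x != a) t := by
        simp
      rw [h1, ← ih, PySem.Set.ofList_cons]
      simp only [PySem.Set.discard, List.filter_cons, beq_self_eq_true, Bool.not_true,
        Bool.false_eq_true, List.filter_filter]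
      apply List.filter_congr
      intro x _
      simp
    · have h1 : List.filter (fun x => x != i) (a :: t) = a :: List.filter (fun x => x != i) t := by
        simp [hai]
      rw [h1, PySem.Set.ofList_cons, PySem.Set.ofList_cons, ← ih]
      simp only [PySem.Set.discard, List.filter_cons, List.filter_filter]
      rw [if_pos (by simp [hai])]
      congr 1
      apply List.filter_congr
      intro x _
      exact Bool.and_comm _ _

-- A's occurrence fold equals the count-weighted fold over the distinct digits.
theorem pv_main (ys : List (Int × Int)) : ∀ (N : Nat) (l : List Int), l.length ≤ N →
    ∀ d, l.foldl (fun d a => pvPass ys a 1 d) d =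
      ((PySem.Set.ofList l).map (fun k => (k, (l.count k : Int)))).foldl
        (fun d p => pvPass ys p.1 p.2 d) d := by
  intro N
  induction N with
  | zero =>
    intro l hl d
    rw [List.length_eq_zero_iff.mp (Nat.le_zero.mp hl)]
    rfl
  | succ N ih =>
    intro l hl d
    cases l with
    | nil => rfl
    | cons i t =>
      show t.foldl _ (pvPass ys i 1 d) = _
      have hP : ∀ jv ∈ ys, (pvPass ys i 1 d).contains (jv.1 + i) = true := by
        intro jv hjv
        exact pv_contains_pvFoldS_of_mem _ d
          (List.mem_map.mpr ⟨jv, hjv, rfl⟩)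
      rw [pv_rearrange ys i t (pvPass ys i 1 d) hP,
        pv_iterate_merge ys i 1 (t.count i) d]
      have hlen : (t.filter (fun a => a != i)).length ≤ N :=
        le_trans (List.length_filter_le _ _) (Nat.succ_le_succ_iff.mp hl)
      rw [ih (t.filter (fun a => a != i)) hlen]
      rw [PySem.Set.ofList_cons, pv_discard_ofList]
      simp only [List.map_cons, List.foldl_cons, List.count_cons_self]
      have hstep : ((t.count i : Int) + 1) = ((t.count i + 1 : Nat) : Int) := by push_cast; ring
      rw [hstep]
      congr 1
      apply List.map_congr_left
      intro k hk
      have hk' := (PySem.Set.mem_ofList _ _).mp hk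
      have hkt := List.mem_filter.mp hk'
      have hki : k ≠ i := bne_iff_ne.mp hkt.2
      have h3 : List.count k (i :: t) = List.count k t := by
        simp [Ne.symm hki]
      have h4 : List.count k (List.filter (fun a => a != i) t) = List.count k t :=
        List.count_filter (p := fun a => a != i) (l := t) hkt.2
      rw [h3, h4]

-- Bridge for A: one inner pass of A (over ds.keys, with the if/else) is pvPass ds i 1.
theorem pv_bridgeA (ds : List (Int × Int)) (h : (ds.map Prod.fst).Nodup)
    (nds : PySem.Dict Int Int) (i : Int) :
    (PySem.Dict.mk ds).keys.foldl (fun nds j =>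
      if nds.contains (j + i) = false then
        nds.insert (j + i) ((PySem.Dict.mk ds).getD j 0)
      else
        nds.modify (j + i) 0 (· + (PySem.Dict.mk ds).getD j 0)) nds = pvPass ds i 1 nds := by
  show (ds.map (fun x => x.1)).foldl _ nds = (ds.map (fun jv => (jv.1 + i, 1 * jv.2))).foldl pvS nds
  rw [List.foldl_map, List.foldl_map]
  apply PySem.List.foldl_congr_mem
  intro acc jv hjv
  have hv : (PySem.Dict.mk ds).getD jv.1 0 = jv.2 := by
    apply PySem.Dict.getD_of_mem_items (d := PySem.Dict.mk ds) (by simpa using hjv)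
    exact h
  simp only [hv, pvS, PySem.Dict.modify, one_mul]
  by_cases hc : acc.contains (jv.1 + i) = true
  · rw [if_neg (by simp [hc])]
  · have hc' : acc.contains (jv.1 + i) = false := by simpa using hc
    rw [if_pos hc', PySem.Dict.getD_of_not_contains acc 0 hc', zero_add]

-- ===== items characterization of the weighted fold (connecting to B's gather form) =====

theorem pv_getD_pvFoldS (ps : List (Int × Int)) (d : PySem.Dict Int Int) (k : Int) :
    (pvFoldS ps d).getD k 0
      = d.getD k 0 + ((ps.filter (fun p => p.1 == k)).map (fun p => p.2)).sum := by
  induction ps generalizing d with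
  | nil => simp [pvFoldS]
  | cons p ps ih =>
    show (pvFoldS ps (pvS d p)).getD k 0 = _
    rw [ih]
    by_cases h : p.1 = k
    · rw [List.filter_cons_of_pos (by simp [h])]
      subst h
      simp only [pvS, PySem.Dict.getD_insert_self, List.map_cons, List.sum_cons]
      ring
    · rw [List.filter_cons_of_neg (by simp [h])]
      simp only [pvS]
      rw [PySem.Dict.getD_insert_of_ne _ _ _ (Ne.symm h)]

theorem pv_lookup_sum (x : Int) : ∀ (ds : List (Int × Int)), (ds.map Prod.fst).Nodup →
    ((ds.filter (fun jv => jv.1 == x)).map (fun p => p.2)).sum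
      = (PySem.Dict.mk ds).getD x 0 := by
  intro ds
  induction ds with
  | nil => intro _; rfl
  | cons p rest ih =>
    intro h
    obtain ⟨j, v⟩ := p
    rw [List.map_cons, List.nodup_cons] at h
    by_cases hx : j = x
    · subst hx
      rw [List.filter_cons_of_pos (by simp)]
      have hrest : rest.filter (fun jv => jv.1 == j) = [] := by
        rw [List.filter_eq_nil_iff]
        intro a ha hcontra
        exact h.1 (List.mem_map.mpr ⟨a, ha, (beq_iff_eq.mp hcontra)⟩)
      rw [hrest]
      rw [PySem.Dict.getD_eq_get?_getD, PySem.Dict.get?_mk_cons]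
      simp
    · rw [List.filter_cons_of_neg (by simp [hx]), ih h.2]
      simp [PySem.Dict.getD_eq_get?_getD, PySem.Dict.get?_mk_cons, hx]

theorem pv_getD_pvPass (ds : List (Int × Int)) (h : (ds.map Prod.fst).Nodup)
    (i c k : Int) (d : PySem.Dict Int Int) :
    (pvPass ds i c d).getD k 0 = d.getD k 0 + c * (PySem.Dict.mk ds).getD (k - i) 0 := by
  show (pvFoldS (pvSteps ds i c) d).getD k 0 = _
  rw [pv_getD_pvFoldS]
  congr 1
  have hlist : (pvSteps ds i c).filter (fun p => p.1 == k)
      = (ds.filter (fun jv => jv.1 == k - i)).map (fun jv => (jv.1 + i, c * jv.2)) := by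
    induction ds with
    | nil => rfl
    | cons a t iht =>
      have ht : (List.map Prod.fst t).Nodup := by
        rw [List.map_cons, List.nodup_cons] at h
        exact h.2
      show ((a.1 + i, c * a.2) :: pvSteps t i c).filter (fun p => p.1 == k) = _
      by_cases h' : a.1 + i = k
      · rw [List.filter_cons_of_pos (by simpa using h'),
          List.filter_cons_of_pos (by simp only [beq_iff_eq]; omega), List.map_cons, iht ht]
      · rw [List.filter_cons_of_neg (by simpa using h'),
          List.filter_cons_of_neg (by simp only [beq_iff_eq]; omega), iht ht]
  rw [hlist, List.map_map]
  have hm : ((fun p : Int × Int => p.2) ∘ fun jv : Int × Int => (jv.1 + i, c * jv.2))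
      = fun jv : Int × Int => c * (fun p : Int × Int => p.2) jv := rfl
  rw [hm]
  rw [List.sum_map_mul_left]
  rw [pv_lookup_sum (k - i) ds h]

theorem pv_getD_fold (ds : List (Int × Int)) (h : (ds.map Prod.fst).Nodup) (k : Int) :
    ∀ (l : List (Int × Int)) (d : PySem.Dict Int Int),
    (l.foldl (fun d p => pvPass ds p.1 p.2 d) d).getD k 0
      = d.getD k 0 + (l.map (fun p => p.2 * (PySem.Dict.mk ds).getD (k - p.1) 0)).sum := by
  intro l
  induction l with
  | nil => intro d; simp
  | cons p t ih =>
    intro d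
    rw [List.foldl_cons, ih, pv_getD_pvPass ds h, List.map_cons, List.sum_cons]
    ring

theorem pv_keys_pvPass (ds : List (Int × Int)) (i c : Int) (d : PySem.Dict Int Int) :
    (pvPass ds i c d).keys = PySem.Set.update d.keys (ds.map (fun jv => jv.1 + i)) := by
  have h1 : pvPass ds i c d
      = (pvSteps ds i c).foldl
          (fun d (x : Int × Int) => d.insert x.1 (d.getD x.1 0 + x.2)) d := rfl
  rw [h1, PySem.Dict.keys_foldl_insert_key]
  congr 1
  rw [pvSteps, List.map_map]
  rfl

theorem pv_nodup_fold (ds : List (Int × Int)) :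
    ∀ (l : List (Int × Int)) (d : PySem.Dict Int Int), d.keys.Nodup →
    (l.foldl (fun d p => pvPass ds p.1 p.2 d) d).keys.Nodup := by
  intro l
  induction l with
  | nil => intro d hd; exact hd
  | cons p t ih =>
    intro d hd
    rw [List.foldl_cons]
    apply ih
    have h1 : pvPass ds p.1 p.2 d
        = (pvSteps ds p.1 p.2).foldl
            (fun d (x : Int × Int) => d.insert x.1 (d.getD x.1 0 + x.2)) d := rfl
    rw [h1]
    exact PySem.Dict.nodup_keys_foldl_insert_key _ _ _ _ hd

theorem pv_keys_fold (ds : List (Int × Int)) :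
    ∀ (l : List (Int × Int)) (d : PySem.Dict Int Int),
    (l.foldl (fun d p => pvPass ds p.1 p.2 d) d).keys
      = l.foldl (fun ord p => PySem.Set.update ord (ds.map (fun jv => jv.1 + p.1))) d.keys := by
  intro l
  induction l with
  | nil => intro d; rfl
  | cons p t ih =>
    intro d
    rw [List.foldl_cons, List.foldl_cons, ih, pv_keys_pvPass]

-- ===== VERDICT (by name: the statement is the Claim_ definition above) =====
theorem add_digit_spec : Claim_equal_add_digit := by
  intro ds digits _ hpre
  unfold Spec_add_digit
  simp only [add_digit]
  have hA : (fun (nds : PySem.Dict Int Int) (i : Int) =>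
      (PySem.Dict.mk ds).keys.foldl (fun nds j =>
        if nds.contains (j + i) = false then
          nds.insert (j + i) ((PySem.Dict.mk ds).getD j 0)
        else
          nds.modify (j + i) 0 (· + (PySem.Dict.mk ds).getD j 0)) nds)
      = (fun d a => pvPass ds a 1 d) := by
    funext nds i
    exact pv_bridgeA ds hpre nds i
  rw [hA, pv_main ds digits.length digits le_rfl (PySem.Dict.mk ds)]
  have hnd : (PySem.Dict.mk ds).keys.Nodup := hpre
  simp only [add_digit_alt, PySem.Dict.foldl_insert_getD_add_one_eq_counter,
    PySem.Dict.keys_counter, PySem.Dict.items_counter]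
  rw [PySem.Dict.items_eq_map_keys _ (pv_nodup_fold ds _ _ hnd) 0]
  have hkeys :
      ((((PySem.Set.ofList digits).map (fun k => (k, (digits.count k : Int)))).foldl
        (fun d p => pvPass ds p.1 p.2 d) (PySem.Dict.mk ds)).keys)
      = (PySem.Set.ofList digits).foldl (fun ord i =>
          (PySem.Dict.mk ds).keys.foldl (fun ord j => PySem.Set.add ord (j + i)) ord)
          (PySem.Set.ofList (PySem.Dict.mk ds).keys) := by
    rw [PySem.Set.ofList_eq_self_of_nodup _ hnd, pv_keys_fold, List.foldl_map]
    apply PySem.List.foldl_congr_mem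
    intro acc x _
    have h2 : ds.map (fun jv => jv.1 + x) = (PySem.Dict.mk ds).keys.map (fun j => j + x) := by
      show _ = (ds.map Prod.fst).map (fun j => j + x)
      rw [List.map_map]
      rfl
    show PySem.Set.update acc (ds.map fun jv => jv.1 + x) = _
    rw [h2]
    show (((PySem.Dict.mk ds).keys.map (fun j => j + x)).foldl PySem.Set.add acc) = _
    rw [List.foldl_map]
  rw [hkeys]
  apply List.map_congr_left
  intro k _
  have hval := pv_getD_fold ds hpre k
    ((PySem.Set.ofList digits).map (fun k => (k, (digits.count k : Int)))) (PySem.Dict.mk ds)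
  rw [hval, PySem.List.foldl_add]
  simp
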